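-- pv_equiv track=rewrite | github.com/xiaolutang/personal-growth-assistant | backend/tests/eval/report_generator.py | _render_tool_call_distribution
-- ===== SOURCE A (Python) =====
-- from typing import Any, Dict, List, Optional, Set
--
-- def _render_tool_call_distribution(
--     failed_cases: List[Dict[str, Any]],
--     negative_violations: List[Dict[str, Any]],
-- ) -> str:
--     """渲染工具调用次数分布表（用于新模板 Section 7）
--
--     基于 failed_cases + negative_violations 统计工具调用分布。
--     注意：通过的用例不在 EvalReportData 中，因此分布仅覆盖异常用例。
--     """
--     all_visible = failed_cases + negative_violations
--     if not all_visible: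
--         return '<h3>Tool Call Count Distribution</h3><div class="empty-state">No tool call data available.</div>'
--     # 收集每个用例的工具调用次数
--     tool_counts: Dict[int, int] = {}
--     for c in all_visible:
--         actual = c.get("actual_tools", [])
--         count = len(actual) if isinstance(actual, list) else 0
--         tool_counts[count] = tool_counts.get(count, 0) + 1
--
--     rows = []
--     for n_calls in sorted(tool_counts.keys()):
--         rows.append(
--             f"<tr><td>{n_calls} tool(s) called</td>"
--             f"<td>{tool_counts[n_calls]}</td></tr>"
--         )
--     return (
--         '<h3>Tool Call Count Distribution (Failed/Violated Cases)</h3>'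
--         "<table><tr><th>Tool Calls</th><th>Count</th></tr>"
--         f"{''.join(rows)}</table>"
--     )
-- ===== SOURCE B (Python) =====
-- from typing import Any, Dict, List
--
--
-- def _render_tool_call_distribution(
--     failed_cases: List[Dict[str, Any]],
--     negative_violations: List[Dict[str, Any]],
-- ) -> str:
--     """Same output as A, but with no tally dictionary at all: sort the flat
--     list of per-case tool-call counts, then scan it once, grouping runs of
--     equal values; each run yields one table row (value, run length)."""
--     all_visible = failed_cases + negative_violations
--     if not all_visible:
--         return '<h3>Tool Call Count Distribution</h3><div class="empty-state">No tool call data available.</div>'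
--     counts = sorted(
--         len(actual) if isinstance(actual := c.get("actual_tools", []), list) else 0
--         for c in all_visible
--     )
--     rows = []
--     i = 0
--     total = len(counts)
--     while i < total:
--         j = i + 1
--         while j < total and counts[j] == counts[i]:
--             j += 1
--         rows.append(f"<tr><td>{counts[i]} tool(s) called</td><td>{j - i}</td></tr>")
--         i = j
--     return (
--         '<h3>Tool Call Count Distribution (Failed/Violated Cases)</h3>'
--         "<table><tr><th>Tool Calls</th><th>Count</th></tr>"
--         f"{''.join(rows)}</table>"
--     )
-- ===== Notes on version B (the rewrite author's own statement) =====
-- stated objective: alternative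
-- what changed: Replaces A's hash-map tally (dict count->frequency built case by case, then sorted keys with dict lookups) by a sort-then-group pass: the flat list of per-case tool-call counts is fully sorted, then scanned once with a two-index run-grouping loop that emits one row per run of equal values.
import Mathlib
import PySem

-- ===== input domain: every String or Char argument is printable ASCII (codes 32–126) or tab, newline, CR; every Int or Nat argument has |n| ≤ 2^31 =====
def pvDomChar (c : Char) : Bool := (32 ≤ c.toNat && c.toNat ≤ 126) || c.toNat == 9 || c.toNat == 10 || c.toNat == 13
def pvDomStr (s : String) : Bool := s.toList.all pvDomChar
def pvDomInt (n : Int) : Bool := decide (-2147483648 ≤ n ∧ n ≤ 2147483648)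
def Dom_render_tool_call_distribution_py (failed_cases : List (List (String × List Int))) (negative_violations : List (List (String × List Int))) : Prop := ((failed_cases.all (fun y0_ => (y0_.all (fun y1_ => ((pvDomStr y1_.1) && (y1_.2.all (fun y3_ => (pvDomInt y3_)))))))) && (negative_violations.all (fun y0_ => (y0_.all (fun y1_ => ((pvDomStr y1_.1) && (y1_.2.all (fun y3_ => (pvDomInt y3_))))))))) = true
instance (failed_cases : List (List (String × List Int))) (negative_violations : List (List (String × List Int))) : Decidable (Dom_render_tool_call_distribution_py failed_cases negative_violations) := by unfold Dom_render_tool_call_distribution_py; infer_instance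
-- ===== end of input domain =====

-- ===== PORT A =====
-- B replaces A's hash-tally dict with a sort of the flat per-case count list followed by
-- a single run-grouping scan (objective: alternative; return value only, no mutation involved).
def pvEmptyMsg : String := "<h3>Tool Call Count Distribution</h3><div class=\"empty-state\">No tool call data available.</div>"
def pvHeader : String := "<h3>Tool Call Count Distribution (Failed/Violated Cases)</h3><table><tr><th>Tool Calls</th><th>Count</th></tr>"
def pvRow (n freq : Int) : String :=
  "<tr><td>" ++ PySem.Int.toStr n ++ " tool(s) called</td><td>" ++ PySem.Int.toStr freq ++ "</td></tr>"

def render_tool_call_distribution_py (failed_cases : List (List (String × List Int))) (negative_violations : List (List (String × List Int))) : String :=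
  let all_visible := failed_cases ++ negative_violations
  if all_visible = [] then pvEmptyMsg
  else
    -- tool_counts: Dict[int, int]; for c in all_visible: tally len(c.get("actual_tools", []))
    let tool_counts : PySem.Dict Int Int :=
      all_visible.foldl (fun d c =>
        let actual : List Int := (PySem.Dict.mk c).getD "actual_tools" []
        let count : Int := actual.length
        d.insert count (d.getD count 0 + 1)) PySem.Dict.empty
    let rows : List String :=
      (PySem.List.sorted tool_counts.keys (fun x => x) false).foldl
        (fun rows n_calls => rows ++ [pvRow n_calls (tool_counts.getD n_calls 0)]) []
    pvHeader ++ String.join rows ++ "</table>"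

-- ===== PORT B =====
-- the two-index while loop of Source B: emit a row for the run starting at the head
-- (j - i = 1 + length of the following stretch of equal values), continue at index j
def pvGroupRows : List Int → List String
  | [] => []
  | x :: xs =>
    pvRow x (1 + ((xs.takeWhile (· == x)).length : Int)) :: pvGroupRows (xs.dropWhile (· == x))
termination_by s => s.length
decreasing_by
  have := (List.dropWhile_sublist (l := xs) (p := (· == x))).length_le
  simp; omega

def render_tool_call_distribution_py_alt (failed_cases : List (List (String × List Int))) (negative_violations : List (List (String × List Int))) : String :=
  let all_visible := failed_cases ++ negative_violations
  if all_visible = [] then pvEmptyMsg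
  else
    let counts : List Int :=
      PySem.List.sorted
        (all_visible.map (fun c => (((PySem.Dict.mk c).getD "actual_tools" []).length : Int)))
        (fun x => x) false
    let rows : List String := pvGroupRows counts
    pvHeader ++ String.join rows ++ "</table>"

-- ===== PRECONDITION & SPEC =====
def Spec_render_tool_call_distribution_py (failed_cases : List (List (String × List Int))) (negative_violations : List (List (String × List Int))) (out : String) : Prop := out = render_tool_call_distribution_py_alt failed_cases negative_violations
instance (failed_cases : List (List (String × List Int))) (negative_violations : List (List (String × List Int))) (out : String) : Decidable (Spec_render_tool_call_distribution_py failed_cases negative_violations out) := by unfold Spec_render_tool_call_distribution_py; infer_instance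

-- ===== CLAIM (what is proved, stated in full; the proofs are below) =====
def Claim_equal_render_tool_call_distribution_py : Prop := ∀ (failed_cases : List (List (String × List Int))) (negative_violations : List (List (String × List Int))), Dom_render_tool_call_distribution_py failed_cases negative_violations → Spec_render_tool_call_distribution_py failed_cases negative_violations (render_tool_call_distribution_py failed_cases negative_violations)

-- ===== LEMMAS AND PROOFS =====

-- the heads of the runs pvGroupRows walks over
def pvRunHeads : List Int → List Int
  | [] => []
  | x :: xs => x :: pvRunHeads (xs.dropWhile (· == x))
termination_by s => s.length
decreasing_by
  have := (List.dropWhile_sublist (l := xs) (p := (· == x))).length_le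
  simp; omega

theorem mem_pvRunHeads (s : List Int) (y : Int) : y ∈ pvRunHeads s ↔ y ∈ s := by
  induction s using pvRunHeads.induct with
  | case1 => simp [pvRunHeads]
  | case2 x xs ih =>
    rw [pvRunHeads]
    simp only [List.mem_cons]
    constructor
    · rintro (rfl | h)
      · exact .inl rfl
      · exact .inr ((List.dropWhile_sublist (l := xs) (p := (· == x))).mem (ih.mp h))
    · rintro (rfl | h)
      · exact .inl rfl
      · rw [← List.takeWhile_append_dropWhile (p := (· == x)) (l := xs)] at h
        rcases List.mem_append.mp h with h | h
        · have := List.mem_takeWhile_imp h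
          simp at this
          exact .inl this
        · exact .inr (ih.mpr h)

-- every element of (xs.dropWhile (· == x)) is strictly greater than x, when x :: xs is sorted
theorem dropWhile_gt (x : Int) (xs : List Int) (hs : (x :: xs).Pairwise (· ≤ ·)) :
    ∀ y ∈ xs.dropWhile (· == x), x < y := by
  intro y hy
  have hle : x ≤ y := (List.pairwise_cons.mp hs).1 y
    ((List.dropWhile_sublist (l := xs) (p := (· == x))).mem hy)
  rcases eq_or_lt_of_le hle with h | h
  · exfalso
    -- y = x sits in dropWhile: contradiction with sortedness (head of dropWhile ≠ x, all later ≥ head)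
    cases hd : xs.dropWhile (· == x) with
    | nil => simp [hd] at hy
    | cons h0 t =>
      have hh0 : ¬ (h0 == x) = true := by
        have := List.head?_dropWhile_not (p := (· == x)) (l := xs)
        rw [hd] at this; simpa using this
      have hxh0 : x ≤ h0 := (List.pairwise_cons.mp hs).1 h0
        ((List.dropWhile_sublist (l := xs) (p := (· == x))).mem (by simp [hd]))
      have hxlt : x < h0 := lt_of_le_of_ne hxh0 (fun hEq => hh0 (by simp [hEq]))
      rw [hd] at hy
      rcases List.mem_cons.mp hy with rfl | hy'
      · omega
      · have hpd : (h0 :: t).Pairwise (· ≤ ·) := by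
          have : (xs.dropWhile (· == x)).Pairwise (· ≤ ·) :=
            (List.pairwise_cons.mp hs).2.sublist (List.dropWhile_sublist _)
          rwa [hd] at this
        have := (List.pairwise_cons.mp hpd).1 y hy'
        omega
  · exact h

theorem pvRunHeads_pairwise (s : List Int) (hs : s.Pairwise (· ≤ ·)) :
    (pvRunHeads s).Pairwise (· < ·) := by
  induction s using pvRunHeads.induct with
  | case1 => simp [pvRunHeads]
  | case2 x xs ih =>
    rw [pvRunHeads]
    refine List.pairwise_cons.mpr ⟨?_, ?_⟩
    · intro y hy
      exact dropWhile_gt x xs hs y ((mem_pvRunHeads _ y).mp hy)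
    · exact ih ((List.pairwise_cons.mp hs).2.sublist (List.dropWhile_sublist _))

theorem pvGroupRows_eq_map (s : List Int) (hs : s.Pairwise (· ≤ ·)) :
    pvGroupRows s = (pvRunHeads s).map (fun n => pvRow n (s.count n : Int)) := by
  induction s using pvRunHeads.induct with
  | case1 => simp [pvGroupRows, pvRunHeads]
  | case2 x xs ih =>
    rw [pvGroupRows, pvRunHeads, List.map_cons]
    have hxs : xs = xs.takeWhile (· == x) ++ xs.dropWhile (· == x) :=
      (List.takeWhile_append_dropWhile ..).symm
    have hsd : (xs.dropWhile (· == x)).Pairwise (· ≤ ·) :=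
      (List.pairwise_cons.mp hs).2.sublist (List.dropWhile_sublist _)
    have htcount : ∀ v, (xs.takeWhile (· == x)).count v
        = if v = x then (xs.takeWhile (· == x)).length else 0 := by
      intro v
      split_ifs with hv
      · subst hv
        refine List.count_eq_length.mpr (fun a ha => ?_)
        have := List.mem_takeWhile_imp ha
        simp at this
        exact this.symm
      · refine List.count_eq_zero.mpr (fun ha => ?_)
        have := List.mem_takeWhile_imp ha
        simp at this
        exact hv this
    have hdz : (xs.dropWhile (· == x)).count x = 0 :=
      List.count_eq_zero.mpr (fun ha => absurd (dropWhile_gt x xs hs x ha) (lt_irrefl x))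
    congr 1
    · -- head row: count of x in x::xs = 1 + takeWhile length
      have hxcount : xs.count x = (xs.takeWhile (· == x)).length := by
        conv_lhs => rw [hxs]
        rw [List.count_append, htcount, if_pos rfl, hdz, Nat.add_zero]
      rw [List.count_cons_self, hxcount]
      push_cast; ring_nf
    · -- tail rows: counts in s restrict to counts in the dropWhile suffix
      rw [ih hsd]
      apply List.map_congr_left
      intro n hn
      have hgt : x < n := dropWhile_gt x xs hs n ((mem_pvRunHeads _ n).mp hn)
      have hdn : (x :: xs).count n = (xs.dropWhile (· == x)).count n := by
        rw [List.count_cons_of_ne (by omega)]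
        conv_lhs => rw [hxs]
        rw [List.count_append, htcount, if_neg (by omega : ¬ n = x), Nat.zero_add]
      rw [hdn]

theorem pvRunHeads_sorted_eq (l : List Int) :
    PySem.List.sorted (PySem.Set.ofList l) (fun x => x) false
      = pvRunHeads (PySem.List.sorted l (fun x => x) false) := by
  apply PySem.List.sorted_eq_of_perm_of_pairwise_lt
  · apply (List.perm_ext_iff_of_nodup ?_ (PySem.Set.nodup_ofList l)).mpr
    · intro a
      rw [mem_pvRunHeads, PySem.List.mem_sorted, PySem.Set.mem_ofList]
    · exact (pvRunHeads_pairwise _ (by simpa using PySem.List.sorted_pairwise l (fun x => x))).nodup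
  · simpa using pvRunHeads_pairwise _ (by simpa using PySem.List.sorted_pairwise l (fun x => x))

theorem render_tool_call_distribution_py_eq (failed_cases negative_violations : List (List (String × List Int))) :
    render_tool_call_distribution_py failed_cases negative_violations
      = render_tool_call_distribution_py_alt failed_cases negative_violations := by
  unfold render_tool_call_distribution_py render_tool_call_distribution_py_alt
  set all_visible := failed_cases ++ negative_violations with hav
  by_cases h : all_visible = []
  · simp [h]
  · simp only [if_neg h]
    set l : List Int :=
      all_visible.map (fun c => (((PySem.Dict.mk c).getD "actual_tools" []).length : Int)) with hl
    have htally :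
        all_visible.foldl (fun d c =>
            let actual : List Int := (PySem.Dict.mk c).getD "actual_tools" []
            let count : Int := actual.length
            d.insert count (d.getD count 0 + 1)) PySem.Dict.empty
          = PySem.Dict.counter l := by
      rw [hl, ← PySem.Dict.foldl_insert_getD_add_one_eq_counter, List.foldl_map]
    rw [htally, PySem.Dict.keys_counter, PySem.List.foldl_append_singleton_eq_map]
    simp only [List.nil_append, PySem.Dict.getD_counter]
    rw [pvRunHeads_sorted_eq,
        pvGroupRows_eq_map _ (by simpa using PySem.List.sorted_pairwise l (fun x => x))]
    have hc : (fun n : Int => pvRow n ((PySem.List.sorted l (fun x => x) false).count n : Int))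
        = (fun n : Int => pvRow n (l.count n : Int)) := by
      funext n
      rw [List.Perm.count_eq (PySem.List.sorted_perm l (fun x => x) false)]
    rw [hc]

-- ===== VERDICT (by name: the statement is the Claim_ definition above) =====
theorem render_tool_call_distribution_py_spec : Claim_equal_render_tool_call_distribution_py := by
  intro fc nv _
  exact render_tool_call_distribution_py_eq fc nv
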